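-- pv_equiv track=rewrite | github.com/hibeen1/PS- | 요기요3.py | solution
-- ===== SOURCE A (Python) =====
-- def solution(S, C):
--     dic = {}
--     for i in range(len(S)):
--         if S[i] not in dic.keys():
--             dic[S[i]] = []
--         dic[S[i]].append(i+1)
--     sections = []
--     visited = []
--     for value in dic.values():
--         for i in range(len(value) - 1):
--             sections.append([value[i], value[i+1]])
--     visited = [False for _ in range(len(sections))]
--
--     false_cnt = len(visited)
--     answer = 0
--     for idx in C:
--         if false_cnt == 0:
--             break
--         answer += 1
--         for i, section in enumerate(sections):
--             if not visited[i]: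
--                 if idx >= section[0] and idx < section[1]:
--                     visited[i] = True
--                     false_cnt -= 1
--     if false_cnt > 0:
--         return -1
--     return answer
-- ===== SOURCE B (Python) =====
-- def solution(S, C):
--     positions = {}
--     for i, ch in enumerate(S):
--         positions.setdefault(ch, []).append(i + 1)
--     sections = [p for ps in positions.values() for p in zip(ps, ps[1:])]
--     answer = 0
--     for a, b in sections:
--         j = next((k for k, idx in enumerate(C) if a <= idx < b), None)
--         if j is None:
--             return -1
--         answer = max(answer, j + 1)
--     return answer
-- ===== Notes on version B (the rewrite author's own statement) =====
-- stated objective: faster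
-- what changed: A rescans the whole section list for every element of C, marking a visited array until no section is left; B transposes the loops: for each section it scans C only up to the first covering index and returns the maximum such index + 1, exiting at the first uncoverable section (-1).
import Mathlib
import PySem

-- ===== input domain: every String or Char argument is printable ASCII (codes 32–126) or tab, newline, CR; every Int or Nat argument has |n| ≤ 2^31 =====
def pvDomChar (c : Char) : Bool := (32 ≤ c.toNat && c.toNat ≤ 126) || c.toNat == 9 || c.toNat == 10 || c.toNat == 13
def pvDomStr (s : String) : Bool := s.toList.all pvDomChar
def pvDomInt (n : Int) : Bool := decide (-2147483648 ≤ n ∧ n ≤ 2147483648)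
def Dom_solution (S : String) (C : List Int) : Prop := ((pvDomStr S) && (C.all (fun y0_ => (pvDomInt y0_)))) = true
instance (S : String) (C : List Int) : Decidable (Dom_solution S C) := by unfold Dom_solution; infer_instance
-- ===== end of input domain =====

-- B replaces A's per-query scan of the section list (marking a visited array until all sections are
-- covered) by a per-section search for the first covering position in C, returning max index + 1.

-- ===== PORT A =====
-- inner marking loop over the parallel equal-length lists (sections, visited): Python's
-- 'for i, section in enumerate(sections): if not visited[i] and …: visited[i] = True; false_cnt -= 1'
-- is ported as one fold over their zip rebuilding visited in order — same visited list and count after each step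
def aMark (idx : Int) (secs : List (Int × Int)) (visited : List Bool) (cnt : Int) :
    List Bool × Int :=
  (secs.zip visited).foldl
    (fun acc sv =>
      if !sv.2 && decide (idx ≥ sv.1.1 ∧ idx < sv.1.2) then (acc.1 ++ [true], acc.2 - 1)
      else (acc.1 ++ [sv.2], acc.2))
    ([], cnt)

-- 'for idx in C: if false_cnt == 0: break; answer += 1; <inner loop>'; returns (false_cnt, answer)
def aLoop (secs : List (Int × Int)) (C : List Int) (visited : List Bool) (cnt : Int)
    (ans : Int) : Int × Int :=
  match C with
  | [] => (cnt, ans)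
  | idx :: rest =>
    if cnt == 0 then (cnt, ans)
    else
      let m := aMark idx secs visited cnt
      aLoop secs rest m.1 m.2 (ans + 1)

def solution (S : String) (C : List Int) : Int :=
  let dic := (PySem.List.enumerate S.toList 0).foldl
    (fun d p =>
      let d' := if d.contains p.2 then d else d.insert p.2 ([] : List Int)
      d'.modify p.2 [] (· ++ [p.1 + 1]))
    PySem.Dict.empty
  let sections := dic.values.foldl
    (fun acc value =>
      (PySem.List.pyRange 0 (PySem.List.len value - 1) 1).foldl
        (fun acc2 i => acc2 ++ [(PySem.List.pyGetD value i 0, PySem.List.pyGetD value (i + 1) 0)])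
        acc)
    []
  let visited := List.replicate sections.length false
  let r := aLoop sections C visited (sections.length : Int) 0
  if r.1 > 0 then -1 else r.2

-- ===== PORT B =====
-- 'for a, b in sections: j = first k with a <= C[k] < b; if j is None: return -1; answer = max(answer, j+1)'
def bGo (C : List Int) (sections : List (Int × Int)) (answer : Int) : Int :=
  match sections with
  | [] => answer
  | s :: rest =>
    match C.findIdx? (fun idx => decide (s.1 ≤ idx ∧ idx < s.2)) with
    | none => -1
    | some j => bGo C rest (max answer ((j : Int) + 1))

def solution_alt (S : String) (C : List Int) : Int :=
  let positions := (PySem.List.enumerate S.toList 0).foldl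
    (fun d p => (d.setdefault p.2 ([] : List Int)).modify p.2 [] (· ++ [p.1 + 1]))
    PySem.Dict.empty
  let sections := positions.values.flatMap (fun ps => ps.zip ps.tail)
  bGo C sections 0

-- ===== PRECONDITION & SPEC =====
def Spec_solution (S : String) (C : List Int) (out : Int) : Prop := out = solution_alt S C
instance (S : String) (C : List Int) (out : Int) : Decidable (Spec_solution S C out) := by unfold Spec_solution; infer_instance

-- ===== CLAIM (what is proved, stated in full; the proofs are below) =====
def Claim_equal_solution : Prop := ∀ (S : String) (C : List Int), Dom_solution S C → Spec_solution S C (solution S C)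

-- ===== LEMMAS AND PROOFS =====

-- the covering test, as B writes it
def coverB (idx : Int) (s : Int × Int) : Bool := decide (s.1 ≤ idx ∧ idx < s.2)

-- A's loop on the abstract state: U = the still-unvisited sections
def absL (C : List Int) (U : List (Int × Int)) (ans : Int) : Int :=
  match C with
  | [] => if (U.length : Int) > 0 then -1 else ans
  | idx :: rest =>
    if ((U.length : Int) == 0) then ans
    else absL rest (U.filter (fun s => !coverB idx s)) (ans + 1)

-- first index in C covering section s, and the running maximum B computes
def FIdx (C : List Int) (s : Int × Int) : Option Nat :=
  C.findIdx? (fun idx => decide (s.1 ≤ idx ∧ idx < s.2))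

def Mval (C : List Int) (U : List (Int × Int)) : Int :=
  (U.map (fun s => ((FIdx C s).getD 0 : Int) + 1)).foldl max 0

lemma countP_split (p q : α → Bool) (l : List α) :
    l.countP p = l.countP (fun x => p x && q x) + l.countP (fun x => p x && !q x) := by
  induction l with
  | nil => simp
  | cons x t ih =>
    simp only [List.countP_cons, ih]
    cases hp : p x <;> cases hq : q x <;> simp <;> omega

lemma mark_fold (idx : Int) (z : List ((Int × Int) × Bool)) (acc : List Bool) (cnt : Int) :
    z.foldl
      (fun acc sv =>
        if !sv.2 && decide (idx ≥ sv.1.1 ∧ idx < sv.1.2) then (acc.1 ++ [true], acc.2 - 1)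
        else (acc.1 ++ [sv.2], acc.2))
      (acc, cnt)
    = (acc ++ z.map (fun sv => sv.2 || coverB idx sv.1),
       cnt - (z.countP (fun sv => !sv.2 && coverB idx sv.1) : Int)) := by
  induction z generalizing acc cnt with
  | nil => simp
  | cons sv t ih =>
    simp only [List.foldl_cons, List.map_cons, List.countP_cons]
    by_cases h : (!sv.2 && coverB idx sv.1) = true
    · have hc : coverB idx sv.1 = true := (Bool.and_eq_true_iff.mp h).2
      have hv : sv.2 = false := by
        cases hsv : sv.2 <;> simp [hsv] at h ⊢
      simp only [coverB] at h hc
      rw [if_pos h, ih]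
      simp [hv, hc, coverB]
      omega
    · have h' : (!sv.2 && decide (idx ≥ sv.1.1 ∧ idx < sv.1.2)) = false := by
        simpa [coverB, ge_iff_le] using h
      rw [h', if_neg (by simp), ih]
      have : (sv.2 || coverB idx sv.1) = sv.2 := by
        cases hsv : sv.2
        · simp at h ⊢; simpa [hsv] using h
        · simp [hsv]
      simp [h, this]

lemma zip_map_zip (secs : List (Int × Int)) (visited : List Bool)
    (f : (Int × Int) × Bool → Bool) (h : visited.length = secs.length) :
    secs.zip ((secs.zip visited).map f) = (secs.zip visited).map (fun sv => (sv.1, f sv)) := by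
  induction secs generalizing visited with
  | nil => simp
  | cons s t ih =>
    cases visited with
    | nil => simp at h
    | cons v vs =>
      simp only [List.zip_cons_cons, List.map_cons]
      rw [ih vs (by simpa using h)]

lemma loop_abs (C : List Int) (secs : List (Int × Int)) (visited : List Bool) (ans : Int)
    (h : visited.length = secs.length) :
    (let r := aLoop secs C visited
        (((secs.zip visited).countP (fun sv => !sv.2) : Nat) : Int) ans;
     if r.1 > 0 then -1 else r.2)
    = absL C (((secs.zip visited).filter (fun sv => !sv.2)).map (·.1)) ans := by
  induction C generalizing visited ans with
  | nil =>
    simp only [aLoop, absL, List.length_map, ← List.countP_eq_length_filter]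
  | cons idx rest ih =>
    set z := secs.zip visited with hz
    by_cases h0 : z.countP (fun sv => !sv.2) = 0
    · simp only [aLoop, absL, List.length_map, ← List.countP_eq_length_filter, h0]
      norm_num
    · have hbeq : ((z.countP (fun sv => !sv.2) : Int) == 0) = false :=
        beq_eq_false_iff_ne.mpr (by exact_mod_cast h0)
      have hbeq2 : ((((z.filter (fun sv => !sv.2)).map (·.1)).length : Int) == 0) = false := by
        rw [List.length_map, ← List.countP_eq_length_filter]
        exact beq_eq_false_iff_ne.mpr (by exact_mod_cast h0)
      simp only [aLoop, absL, hbeq, hbeq2]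
      have hmark : aMark idx secs visited ((z.countP (fun sv => !sv.2) : Nat) : Int)
          = (z.map (fun sv => sv.2 || coverB idx sv.1),
             ((z.countP (fun sv => !sv.2) : Nat) : Int)
               - (z.countP (fun sv => !sv.2 && coverB idx sv.1) : Int)) := by
        rw [aMark, ← hz, mark_fold]
        simp
      rw [hmark]
      -- new visited
      have hlen' : (z.map (fun sv => sv.2 || coverB idx sv.1)).length = secs.length := by
        simp [hz, List.length_zip, h]
      have hzip' : secs.zip (z.map (fun sv => sv.2 || coverB idx sv.1))
          = z.map (fun sv => (sv.1, sv.2 || coverB idx sv.1)) := by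
        rw [hz, zip_map_zip _ _ _ h]
      have hcnt : ((z.countP (fun sv => !sv.2) : Nat) : Int)
            - (z.countP (fun sv => !sv.2 && coverB idx sv.1) : Int)
          = (((secs.zip (z.map (fun sv => sv.2 || coverB idx sv.1))).countP
              (fun sv => !sv.2) : Nat) : Int) := by
        rw [hzip', List.countP_map]
        have := countP_split (fun sv : (Int × Int) × Bool => !sv.2)
          (fun sv => coverB idx sv.1) z
        have he : z.countP ((fun sv : (Int × Int) × Bool => !sv.2)
              ∘ (fun sv => (sv.1, sv.2 || coverB idx sv.1)))
            = z.countP (fun sv => !sv.2 && !coverB idx sv.1) := by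
          apply List.countP_congr
          intro sv _
          cases hsv : sv.2 <;> cases hcc : coverB idx sv.1 <;> simp [Function.comp, hsv, hcc]
        rw [he]
        omega
      have hU' : ((secs.zip (z.map (fun sv => sv.2 || coverB idx sv.1))).filter
              (fun sv => !sv.2)).map (·.1)
          = ((z.filter (fun sv => !sv.2)).map (·.1)).filter
              (fun s => !coverB idx s) := by
        rw [hzip', List.filter_map, List.map_map, List.filter_map, List.filter_filter]
        rw [show ((fun x : (Int × Int) × Bool => x.1)
              ∘ fun sv : (Int × Int) × Bool => (sv.1, sv.2 || coverB idx sv.1))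
            = (fun x : (Int × Int) × Bool => x.1) from rfl]
        congr 1
        apply List.filter_congr
        intro sv _
        cases hsv : sv.2 <;> cases hcc : coverB idx sv.1 <;> simp [Function.comp, hsv, hcc]
      rw [hcnt, ← hU']
      have := ih (z.map (fun sv => sv.2 || coverB idx sv.1)) (ans + 1) hlen'
      simp only at this
      simp only [Bool.false_eq_true, if_false]
      exact this

lemma bgo_closed (C : List Int) (U : List (Int × Int)) (ans : Int) (hans : 0 ≤ ans) :
    bGo C U ans = if U.all (fun s => (FIdx C s).isSome) then max ans (Mval C U) else -1 := by
  induction U generalizing ans with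
  | nil => simp [bGo, Mval]; omega
  | cons s t ih =>
    cases hF : C.findIdx? (fun idx => decide (s.1 ≤ idx ∧ idx < s.2)) with
    | none =>
      simp only [bGo, hF]
      rw [if_neg (by simp [show FIdx C s = none from hF])]
    | some j =>
      have hF' : FIdx C s = some j := hF
      simp only [bGo, hF]
      rw [ih _ (by positivity)]
      by_cases ht : t.all (fun s => (FIdx C s).isSome)
      · rw [if_pos ht, if_pos (by simp [ht, hF'])]
        have hM : Mval C (s :: t) = max ((j : Int) + 1) (Mval C t) := by
          simp only [Mval, List.map_cons, List.foldl_cons, hF', Option.getD_some]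
          rw [show max 0 ((j:Int)+1) = max ((j:Int)+1) 0 from max_comm _ _,
             List.foldl_assoc]
        rw [hM, max_assoc]
      · rw [if_neg ht, if_neg (by simp [ht])]

lemma mstep (idx : Int) (rest : List Int) (U : List (Int × Int)) :
    ∀ (acc : Int), 0 ≤ acc →
    (∀ s ∈ U, (FIdx (idx :: rest) s).isSome) →
    (U.map (fun s => ((FIdx (idx :: rest) s).getD 0 : Int) + 1)).foldl max (acc + 1)
      = ((U.filter (fun s => !coverB idx s)).map
          (fun s => ((FIdx rest s).getD 0 : Int) + 1)).foldl max acc + 1 := by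
  induction U with
  | nil => simp
  | cons s t ih =>
    intro acc hacc hsome
    have hcons : FIdx (idx :: rest) s
        = if coverB idx s then some 0 else (FIdx rest s).map (· + 1) := by
      simp [FIdx, List.findIdx?_cons, coverB]
    cases hc : coverB idx s with
    | true =>
      have h0 : FIdx (idx :: rest) s = some 0 := by rw [hcons, if_pos hc]
      simp only [List.map_cons, List.foldl_cons, List.filter_cons, hc, h0,
        Option.getD_some]
      rw [show max (acc + 1) ((0:Nat) + 1 : Int) = acc + 1 by omega]
      exact ih acc hacc (fun x hx => hsome x (List.mem_cons_of_mem _ hx))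
    | false =>
      have hs := hsome s (List.mem_cons_self)
      rw [hcons, if_neg (by simp [hc])] at hs
      obtain ⟨j, hj⟩ := Option.isSome_iff_exists.mp (by simpa using hs)
      have hj' : FIdx (idx :: rest) s = some (j + 1) := by
        rw [hcons, if_neg (by simp [hc]), hj]; rfl
      simp only [List.map_cons, List.foldl_cons, List.filter_cons, hc, hj', hj,
        Option.getD_some, Bool.not_false, if_pos]
      rw [show max (acc + 1) (((j:Nat) + 1 : Nat) + 1 : Int) = (max acc ((j:Int)+1)) + 1 by push_cast; omega]
      rw [ih (max acc ((j:Int)+1)) (by positivity)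
        (fun x hx => hsome x (List.mem_cons_of_mem _ hx))]

lemma abs_closed (C : List Int) (U : List (Int × Int)) (ans : Int) :
    absL C U ans = if U.all (fun s => (FIdx C s).isSome) then ans + Mval C U else -1 := by
  induction C generalizing U ans with
  | nil =>
    cases U with
    | nil => simp [absL, Mval]
    | cons s t => simp [absL, FIdx]
  | cons idx rest ih =>
    cases U with
    | nil => simp [absL, Mval]
    | cons s t =>
      rw [absL, if_neg (by simp; omega)]
      rw [ih]
      have hall : ((s :: t).filter (fun x => !coverB idx x)).all
            (fun x => (FIdx rest x).isSome)
          = (s :: t).all (fun x => (FIdx (idx :: rest) x).isSome) := by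
        rw [List.all_filter]
        apply List.all_congr rfl
        intro x
        have : FIdx (idx :: rest) x
            = if coverB idx x then some 0 else (FIdx rest x).map (· + 1) := by
          simp [FIdx, List.findIdx?_cons, coverB]
        cases hc : coverB idx x <;> simp [this, hc]
      rw [hall]
      by_cases h : (s :: t).all (fun x => (FIdx (idx :: rest) x).isSome)
      · rw [if_pos h, if_pos h]
        have hsome : ∀ x ∈ s :: t, (FIdx (idx :: rest) x).isSome :=
          fun x hx => by exact List.all_eq_true.mp h x hx
        -- Mval (idx::rest) (s::t) = Mval rest (filter) + 1
        have : Mval (idx :: rest) (s :: t)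
            = Mval rest ((s :: t).filter (fun x => !coverB idx x)) + 1 := by
          have h1 : Mval (idx :: rest) (s :: t)
              = ((s :: t).map (fun x => ((FIdx (idx :: rest) x).getD 0 : Int) + 1)).foldl
                  max (0 + 1) := by
            simp only [Mval, List.map_cons, List.foldl_cons]
            congr 1
            have := Int.natCast_nonneg ((FIdx (idx :: rest) s).getD 0)
            omega
          rw [h1, mstep idx rest _ 0 le_rfl hsome]
          rfl
        rw [this]; omega
      · rw [if_neg h, if_neg h]

lemma range_zip (v : List Int) :
    (PySem.List.pyRange 0 ((v.length : Int) - 1) 1).map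
      (fun i => (PySem.List.pyGetD v i 0, PySem.List.pyGetD v (i + 1) 0))
    = v.zip v.tail := by
  apply List.ext_getElem
  · simp [PySem.List.length_pyRange_one, List.length_tail]
  · intro k h1 h2
    have hk : k < v.length - 1 := by
      simpa [PySem.List.length_pyRange_one] using h1
    simp only [List.getElem_map, PySem.List.getElem_pyRange_one, List.getElem_zip,
      List.getElem_tail]
    have e0 : (0 : Int) + (k : Int) = (k : Int) := by omega
    rw [e0]
    have e1 : ((k : Int) + 1) = ((k + 1 : Nat) : Int) := by push_cast; ring
    rw [e1]
    rw [PySem.List.pyGetD_natCast, PySem.List.pyGetD_natCast]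
    rw [List.getD_eq_getElem _ _ (by omega), List.getD_eq_getElem _ _ (by omega)]

lemma sections_eq (v : List Int) (acc : List (Int × Int)) :
    (PySem.List.pyRange 0 (PySem.List.len v - 1) 1).foldl
      (fun acc2 i => acc2 ++ [(PySem.List.pyGetD v i 0, PySem.List.pyGetD v (i + 1) 0)]) acc
    = acc ++ v.zip v.tail := by
  rw [PySem.List.foldl_append_singleton_eq_map]
  rw [PySem.List.len_eq, range_zip]

lemma countP_zip_replicate (l : List (Int × Int)) :
    (l.zip (List.replicate l.length false)).countP (fun sv => !sv.2) = l.length := by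
  induction l with
  | nil => rfl
  | cons x t ih => simp [List.replicate_succ, ih]

lemma filter_zip_replicate (l : List (Int × Int)) :
    ((l.zip (List.replicate l.length false)).filter (fun sv => !sv.2)).map (·.1) = l := by
  induction l with
  | nil => rfl
  | cons x t ih => simp [List.replicate_succ, ih]

-- ===== VERDICT (by name: the statement is the Claim_ definition above) =====
theorem solution_spec : Claim_equal_solution := by
  intro S C _
  unfold Spec_solution
  simp only [solution, solution_alt]
  -- the two grouping folds build the same dict
  rw [PySem.List.foldl_congr_mem _ _
    (fun (d : PySem.Dict Char (List Int)) p =>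
      (d.setdefault p.2 ([] : List Int)).modify p.2 [] (· ++ [p.1 + 1])) _
    (by
      intro d p _
      cases hc : d.contains p.2
      · simp [PySem.Dict.setdefault_of_not_contains d _ hc]
      · simp [PySem.Dict.setdefault_of_contains d _ hc])]
  -- the two section constructions build the same list
  rw [PySem.List.foldl_congr_mem _ _
    (fun (acc : List (Int × Int)) value => acc ++ value.zip value.tail) _
    (fun acc v _ => sections_eq v acc)]
  rw [PySem.List.foldl_append_eq_flatMap, List.nil_append]
  set secs := (((PySem.List.enumerate S.toList 0).foldl
    (fun (d : PySem.Dict Char (List Int)) p =>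
      (d.setdefault p.2 ([] : List Int)).modify p.2 [] (· ++ [p.1 + 1]))
    PySem.Dict.empty).values).flatMap (fun ps => ps.zip ps.tail) with hsecs
  -- initial state of A's loop: nothing visited
  have hcnt0 := countP_zip_replicate secs
  have hU0 := filter_zip_replicate secs
  have hloop := loop_abs C secs (List.replicate secs.length false) 0 (by simp)
  rw [hcnt0, hU0] at hloop
  rw [hloop, abs_closed, bgo_closed C secs 0 le_rfl]
  have hM : 0 ≤ Mval C secs := (PySem.List.le_foldl_max _ 0).1
  by_cases hall : secs.all (fun s => (FIdx C s).isSome)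
  · rw [if_pos hall, if_pos hall]
    omega
  · rw [if_neg hall, if_neg hall]
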